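-- pv_equiv track=rewrite | github.com/rubelw/OSSS | src/OSSS/ai/agents/query_data/handlers/policy_versions_handler.py | _select_fieldnames
-- ===== SOURCE A (Python) =====
-- from typing import Any, Dict, List, Sequence
--
-- def _select_fieldnames(rows: Sequence[Dict[str, Any]]) -> List[str]:
--     if not rows:
--         return []
--
--     preferred_order = [
--         "id",
--         "policy_id",
--         "policy_code",
--         "version_number",
--         "version_label",
--         "status",
--         "is_current",
--         "effective_date",
--         "retired_date",
--         "created_at",
--         "updated_at",
--     ]
--
--     all_keys: List[str] = []
--     for r in rows:
--         for k in r.keys():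
--             if k not in all_keys:
--                 all_keys.append(k)
--
--     ordered: List[str] = [k for k in preferred_order if k in all_keys]
--     ordered.extend(k for k in all_keys if k not in ordered)
--     return ordered
-- ===== SOURCE B (Python) =====
-- from typing import Any, Dict, List, Sequence
--
--
-- def _select_fieldnames(rows: Sequence[Dict[str, Any]]) -> List[str]:
--     preferred_order = [
--         "id",
--         "policy_id",
--         "policy_code",
--         "version_number",
--         "version_label",
--         "status",
--         "is_current",
--         "effective_date",
--         "retired_date",
--         "created_at",
--         "updated_at",
--     ]
--     lp = len(preferred_order)
--     rank = {k: i for i, k in enumerate(preferred_order)}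
--     first_seen = {}
--     for r in rows:
--         for k in r:
--             if k not in first_seen:
--                 first_seen[k] = len(first_seen)
--     return sorted(first_seen, key=lambda k: rank.get(k, lp + first_seen[k]))
-- ===== Notes on version B (the rewrite author's own statement) =====
-- stated objective: faster
-- what changed: Replaces A's two filtering passes with quadratic membership scans over a growing key list by one pass recording each key's first-seen position in a dict, then a single sort by the composite integer key rank-in-preferred-list or len(preferred)+first-seen-position.
import Mathlib
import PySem

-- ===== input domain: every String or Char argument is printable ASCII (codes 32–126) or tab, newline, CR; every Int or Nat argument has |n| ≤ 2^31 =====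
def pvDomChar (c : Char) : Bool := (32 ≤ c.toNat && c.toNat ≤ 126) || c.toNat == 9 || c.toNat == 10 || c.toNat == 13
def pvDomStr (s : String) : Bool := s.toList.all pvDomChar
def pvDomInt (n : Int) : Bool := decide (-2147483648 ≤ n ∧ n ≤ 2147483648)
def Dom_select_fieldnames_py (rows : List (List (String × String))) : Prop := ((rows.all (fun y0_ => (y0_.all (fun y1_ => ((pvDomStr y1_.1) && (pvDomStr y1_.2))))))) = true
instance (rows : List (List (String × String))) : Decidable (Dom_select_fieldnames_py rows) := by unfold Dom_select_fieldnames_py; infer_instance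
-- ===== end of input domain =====

-- B replaces A's two filtering passes with a first-seen-position dict plus one sort by a
-- composite integer key (rank in the preferred list, else len(preferred)+first-seen position);
-- same return value, a genuinely different algorithm of similar cost.


-- the constant list both Pythons spell out
def pvPreferredOrder : List String :=
  ["id", "policy_id", "policy_code", "version_number", "version_label", "status",
   "is_current", "effective_date", "retired_date", "created_at", "updated_at"]

-- ===== PORT A =====
def select_fieldnames_py (rows : List (List (String × String))) : List String :=
  if rows = [] then []
  else
    let preferred_order := pvPreferredOrder
    let all_keys : List String :=
      rows.foldl (fun acc r =>
        (r.map (·.1)).foldl (fun acc k => if k ∈ acc then acc else acc ++ [k]) acc) []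
    let ordered : List String := preferred_order.filter (fun k => k ∈ all_keys)
    -- 'ordered.extend(k for k in all_keys if k not in ordered)': the generator is consumed
    -- while 'ordered' grows, so membership is tested against the growing list
    all_keys.foldl (fun o k => if k ∈ o then o else o ++ [k]) ordered

-- ===== PORT B =====
def select_fieldnames_py_alt (rows : List (List (String × String))) : List String :=
  let preferred_order := pvPreferredOrder
  let lp : Int := (preferred_order.length : Int)
  let rank : PySem.Dict String Int :=
    PySem.Dict.ofList ((PySem.List.enumerate preferred_order 0).map (fun p => (p.2, p.1)))
  let first_seen : PySem.Dict String Int :=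
    rows.foldl (fun d r =>
      (r.map (·.1)).foldl (fun d k =>
        if d.contains k then d else d.insert k (d.size : Int)) d) PySem.Dict.empty
  -- 'first_seen[k]' in the sort key: k is always present there, so getD is exact
  PySem.List.sorted first_seen.keys
    (fun k => rank.getD k (lp + first_seen.getD k 0)) false

-- ===== PRECONDITION & SPEC =====
def Spec_select_fieldnames_py (rows : List (List (String × String))) (out : List String) : Prop := out = select_fieldnames_py_alt rows
instance (rows : List (List (String × String))) (out : List String) : Decidable (Spec_select_fieldnames_py rows out) := by unfold Spec_select_fieldnames_py; infer_instance

-- ===== CLAIM (what is proved, stated in full; the proofs are below) =====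
def Claim_equal_select_fieldnames_py : Prop := ∀ (rows : List (List (String × String))), Dom_select_fieldnames_py rows → Spec_select_fieldnames_py rows (select_fieldnames_py rows)

-- ===== LEMMAS AND PROOFS =====

-- proof-side names for the closed terms the two ports build
def pvRank : PySem.Dict String Int :=
  PySem.Dict.ofList ((PySem.List.enumerate pvPreferredOrder 0).map (fun p => (p.2, p.1)))

def pvStepA (acc : List String) (k : String) : List String :=
  if k ∈ acc then acc else acc ++ [k]

def pvStepB (d : PySem.Dict String Int) (k : String) : PySem.Dict String Int :=
  if d.contains k then d else d.insert k (d.size : Int)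

def pvFlatKeys (rows : List (List (String × String))) : List String :=
  rows.flatMap (fun r => r.map (·.1))

def pvK (rows : List (List (String × String))) : List String :=
  rows.foldl (fun acc r => (r.map (·.1)).foldl pvStepA acc) []

def pvFS (rows : List (List (String × String))) : PySem.Dict String Int :=
  rows.foldl (fun d r => (r.map (·.1)).foldl pvStepB d) PySem.Dict.empty

def pvKey (rows : List (List (String × String))) (k : String) : Int :=
  pvRank.getD k (11 + (pvFS rows).getD k 0)

-- nested loop over rows = loop over the flattened key list
theorem pv_fold_flat {σ : Type} (rows : List (List (String × String))) (g : σ → String → σ)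
    (init : σ) :
    rows.foldl (fun s r => (r.map (·.1)).foldl g s) init
      = (rows.flatMap (fun r => r.map (·.1))).foldl g init := by
  induction rows generalizing init with
  | nil => rfl
  | cons r t ih => simp [List.flatMap_cons, List.foldl_append, ih]

theorem pv_nodup_foldA (ks : List String) : ∀ acc, acc.Nodup → (ks.foldl pvStepA acc).Nodup := by
  induction ks with
  | nil => intro acc h; simpa using h
  | cons k t ih =>
    intro acc h
    simp only [List.foldl_cons]
    by_cases hk : k ∈ acc
    · simpa [pvStepA, hk] using ih acc h
    · rw [show pvStepA acc k = acc ++ [k] by simp [pvStepA, hk]]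
      refine ih _ ?_
      simpa [List.concat_eq_append] using h.concat hk

theorem pvK_flat (rows : List (List (String × String))) :
    pvK rows = (pvFlatKeys rows).foldl pvStepA [] := by
  unfold pvK
  rw [pv_fold_flat rows pvStepA []]
  rfl

theorem pvFS_flat (rows : List (List (String × String))) :
    pvFS rows = (pvFlatKeys rows).foldl pvStepB PySem.Dict.empty := by
  unfold pvFS
  rw [pv_fold_flat rows pvStepB PySem.Dict.empty]
  rfl

-- the invariant tying A's key-collection loop to B's first-seen dict loop
theorem pv_fold_items (ks : List String) : ∀ (acc : List String) (d : PySem.Dict String Int),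
    d.items = acc.zipIdx.map (fun p => (p.1, (p.2 : Int))) →
    (ks.foldl pvStepB d).items
      = (ks.foldl pvStepA acc).zipIdx.map (fun p => (p.1, (p.2 : Int))) := by
  induction ks with
  | nil => intro acc d h; simpa using h
  | cons k t ih =>
    intro acc d h
    have hkeys : d.keys = acc := by
      simp [PySem.Dict.keys, h, List.map_map, Function.comp_def]
    have hcont : d.contains k = decide (k ∈ acc) := by
      rw [PySem.Dict.contains_eq_decide_mem_keys, hkeys]
    have hsize : d.size = acc.length := by
      simp [PySem.Dict.size, h]
    simp only [List.foldl_cons]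
    by_cases hk : k ∈ acc
    · have h1 : pvStepB d k = d := by simp [pvStepB, hcont, hk]
      rw [h1, show pvStepA acc k = acc by simp [pvStepA, hk]]
      exact ih acc d h
    · have hc : d.contains k = false := by simp [hcont, hk]
      have h1 : pvStepB d k = d.insert k (d.size : Int) := by simp [pvStepB, hc]
      rw [h1, show pvStepA acc k = acc ++ [k] by simp [pvStepA, hk]]
      apply ih
      rw [PySem.Dict.items_insert, hc, h, hsize]
      simp [List.zipIdx_append, List.zipIdx_cons, List.zipIdx_nil]

theorem pv_fs_items (rows : List (List (String × String))) :
    (pvFS rows).items = (pvK rows).zipIdx.map (fun p => (p.1, (p.2 : Int))) := by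
  rw [pvFS_flat, pvK_flat]
  apply pv_fold_items
  simp [PySem.Dict.empty]

theorem pv_fs_keys (rows : List (List (String × String))) :
    (pvFS rows).keys = pvK rows := by
  simp [PySem.Dict.keys, pv_fs_items, List.map_map, Function.comp_def]

theorem pv_K_nodup (rows : List (List (String × String))) : (pvK rows).Nodup := by
  rw [pvK_flat]
  exact pv_nodup_foldA _ _ List.nodup_nil

theorem pv_fs_getD (rows : List (List (String × String))) (i : Nat) (hi : i < (pvK rows).length) :
    (pvFS rows).getD (pvK rows)[i] 0 = (i : Int) := by
  apply PySem.Dict.getD_of_mem_items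
  · rw [pv_fs_items]
    refine List.mem_map.mpr ⟨((pvK rows)[i], i), ?_, rfl⟩
    have h : (pvK rows).zipIdx[i]'(by simpa using hi) = ((pvK rows)[i], i) := by
      simp [List.getElem_zipIdx]
    rw [← h]
    exact List.getElem_mem _
  · rw [pv_fs_keys]; exact pv_K_nodup rows

-- A's extend loop over a duplicate-free list is append-filter
theorem pv_extend_eq (ks : List String) (hnd : ks.Nodup) : ∀ o : List String,
    ks.foldl pvStepA o = o ++ ks.filter (fun k => !decide (k ∈ o)) := by
  induction ks with
  | nil => simp
  | cons k t ih =>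
    intro o
    have hnd' : t.Nodup := hnd.of_cons
    have hkt : k ∉ t := by simp at hnd; exact hnd.1
    simp only [List.foldl_cons]
    by_cases hk : k ∈ o
    · rw [show pvStepA o k = o by simp [pvStepA, hk], ih hnd' o]
      simp [hk]
    · rw [show pvStepA o k = o ++ [k] by simp [pvStepA, hk], ih hnd' (o ++ [k])]
      have hfc : t.filter (fun x => !decide (x ∈ o ++ [k])) = t.filter (fun x => !decide (x ∈ o)) := by
        apply List.filter_congr
        intro x hx
        have hxk : x ≠ k := fun h => hkt (h ▸ hx)
        simp [List.mem_append, hxk]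
      rw [hfc]
      simp [hk]

-- key values: a preferred key gets its rank, any other key 11 + its first-seen index
theorem pv_key_notin (rows : List (List (String × String))) (k : String)
    (hk : k ∉ pvPreferredOrder) :
    pvKey rows k = 11 + (pvFS rows).getD k 0 := by
  have hkeys : pvRank.keys = pvPreferredOrder := by rfl
  have hnone : pvRank.get? k = none := by
    rw [PySem.Dict.get?_eq_none_iff_not_mem_keys, hkeys]
    exact hk
  unfold pvKey
  rw [PySem.Dict.getD_eq_get?_getD, hnone]
  rfl

theorem pv_map_key_pref (rows : List (List (String × String))) :
    pvPreferredOrder.map (pvKey rows) = [0, 1, 2, 3, 4, 5, 6, 7, 8, 9, 10] := by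
  rfl

theorem pv_key_pref_le (rows : List (List (String × String))) (a : String)
    (ha : a ∈ pvPreferredOrder) : pvKey rows a ≤ 10 := by
  have h : pvKey rows a ∈ pvPreferredOrder.map (pvKey rows) := List.mem_map_of_mem ha
  rw [pv_map_key_pref] at h
  simp at h
  rcases h with h | h | h | h | h | h | h | h | h | h | h <;> omega

theorem pv_fs_getD_nonneg (rows : List (List (String × String))) (b : String)
    (hb : b ∈ pvK rows) : 0 ≤ (pvFS rows).getD b 0 := by
  rcases List.mem_iff_getElem.mp hb with ⟨i, hi, rfl⟩
  rw [pv_fs_getD rows i hi]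
  exact Int.natCast_nonneg i

-- first-seen indices strictly increase along pvK
theorem pv_K_pairwise (rows : List (List (String × String))) :
    (pvK rows).Pairwise (fun a b => (pvFS rows).getD a 0 < (pvFS rows).getD b 0) := by
  rw [List.pairwise_iff_getElem]
  intro i j hi hj hij
  rw [pv_fs_getD rows i hi, pv_fs_getD rows j hj]
  exact_mod_cast hij

-- main agreement
theorem pv_main (rows : List (List (String × String))) :
    select_fieldnames_py rows = select_fieldnames_py_alt rows := by
  by_cases hrows : rows = []
  · subst hrows; rfl
  · have hA : select_fieldnames_py rows
        = (pvK rows).foldl pvStepA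
            (pvPreferredOrder.filter (fun k => decide (k ∈ pvK rows))) := by
      simp only [select_fieldnames_py, if_neg hrows]
      rfl
    have hB : select_fieldnames_py_alt rows
        = PySem.List.sorted ((pvFS rows).keys) (pvKey rows) false := by
      simp only [select_fieldnames_py_alt]
      rfl
    rw [hA, hB, pv_fs_keys]
    set ordered := pvPreferredOrder.filter (fun k => decide (k ∈ pvK rows)) with hord
    rw [pv_extend_eq (pvK rows) (pv_K_nodup rows) ordered]
    have hfilter : (pvK rows).filter (fun k => !decide (k ∈ ordered))
        = (pvK rows).filter (fun k => !decide (k ∈ pvPreferredOrder)) := by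
      apply List.filter_congr
      intro x hx
      simp [hord, List.mem_filter, hx]
    rw [hfilter]
    -- B's sort produces exactly A's concatenation
    have hperm : (ordered ++ (pvK rows).filter (fun k => !decide (k ∈ pvPreferredOrder))).Perm
        (pvK rows) := by
      refine List.Perm.trans (List.Perm.append_right _ ?_)
        (List.filter_append_perm (fun k => decide (k ∈ pvPreferredOrder)) (pvK rows))
      rw [List.perm_ext_iff_of_nodup
        ((by decide : pvPreferredOrder.Nodup).filter _) ((pv_K_nodup rows).filter _)]
      intro a
      simp [List.mem_filter, and_comm]
    have hpair : (ordered ++ (pvK rows).filter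
          (fun k => !decide (k ∈ pvPreferredOrder))).Pairwise
        (fun a b => pvKey rows a < pvKey rows b) := by
      rw [List.pairwise_append]
      refine ⟨?_, ?_, ?_⟩
      · -- within the preferred block
        refine List.Pairwise.sublist (List.filter_sublist) ?_
        rw [← List.pairwise_map (f := pvKey rows), pv_map_key_pref]
        decide
      · -- within the remaining block
        refine List.Pairwise.imp_of_mem ?_
          (List.Pairwise.sublist (List.filter_sublist) (pv_K_pairwise rows))
        intro a b ha hb hlt
        have hna : a ∉ pvPreferredOrder := by simpa using (List.mem_filter.mp ha).2
        have hnb : b ∉ pvPreferredOrder := by simpa using (List.mem_filter.mp hb).2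
        rw [pv_key_notin rows a hna, pv_key_notin rows b hnb]
        omega
      · -- across the two blocks
        intro a ha b hb
        have hap : a ∈ pvPreferredOrder := (List.mem_filter.mp ha).1
        have hbk : b ∈ pvK rows := (List.mem_filter.mp hb).1
        have hnb : b ∉ pvPreferredOrder := by simpa using (List.mem_filter.mp hb).2
        have h1 := pv_key_pref_le rows a hap
        have h2 := pv_fs_getD_nonneg rows b hbk
        rw [pv_key_notin rows b hnb]
        omega
    exact (PySem.List.sorted_eq_of_perm_of_pairwise_lt _ _ _ hperm hpair).symm

-- ===== VERDICT (by name: the statement is the Claim_ definition above) =====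
theorem select_fieldnames_py_spec : Claim_equal_select_fieldnames_py := by
  intro rows _
  show select_fieldnames_py rows = select_fieldnames_py_alt rows
  exact pv_main rows
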